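-- pv_equiv track=rewrite | github.com/dxhj/predictive-parser | predictive_parser/sets.py | _concat_k
-- ===== SOURCE A (Python) =====
-- def _concat_k(
--     a: set[tuple[str, ...]], b: set[tuple[str, ...]], k: int
-- ) -> set[tuple[str, ...]]:
--     """k-length truncated concatenation: {(x++y)[:k] | x in a, y in b}."""
--
--     out: set[tuple[str, ...]] = set()
--     for x in a:
--         if len(x) >= k:
--             out.add(x[:k])
--             continue
--         for y in b:
--             out.add((x + y)[:k])
--     return out
-- ===== SOURCE B (Python) =====
-- def _concat_k(a, b, k):
--     """One pass over `a`; for each short x (len(x) < k) the deduplicated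
--     truncated-b table tbl[m] = list(dict.fromkeys(y[:m] for y in b)) with
--     m = k - len(x) is built once per needed m and reused, combining via
--     the identity (x + y)[:k] == x + y[:m]."""
--     res = set()
--     cache = {}
--     for x in a:
--         m = k - len(x)
--         if m <= 0:
--             res.add(x[:k])
--             continue
--         tbl = cache.get(m)
--         if tbl is None:
--             tbl = list(dict.fromkeys(y[:m] for y in b))
--             cache[m] = tbl
--         for yt in tbl:
--             res.add(x + yt)
--     return res
-- ===== Notes on version B (the rewrite author's own statement) =====
-- stated objective: alternative
-- what changed: Instead of re-slicing (x+y)[:k] for every (x,y) pair, B caches per needed m=k-len(x) a deduplicated truncated-b table list(dict.fromkeys(y[:m] for y in b)) built once, and combines each short x with its table via (x+y)[:k) == x + y[:m]; long x keep the direct x[:k] branch.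
import Mathlib
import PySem

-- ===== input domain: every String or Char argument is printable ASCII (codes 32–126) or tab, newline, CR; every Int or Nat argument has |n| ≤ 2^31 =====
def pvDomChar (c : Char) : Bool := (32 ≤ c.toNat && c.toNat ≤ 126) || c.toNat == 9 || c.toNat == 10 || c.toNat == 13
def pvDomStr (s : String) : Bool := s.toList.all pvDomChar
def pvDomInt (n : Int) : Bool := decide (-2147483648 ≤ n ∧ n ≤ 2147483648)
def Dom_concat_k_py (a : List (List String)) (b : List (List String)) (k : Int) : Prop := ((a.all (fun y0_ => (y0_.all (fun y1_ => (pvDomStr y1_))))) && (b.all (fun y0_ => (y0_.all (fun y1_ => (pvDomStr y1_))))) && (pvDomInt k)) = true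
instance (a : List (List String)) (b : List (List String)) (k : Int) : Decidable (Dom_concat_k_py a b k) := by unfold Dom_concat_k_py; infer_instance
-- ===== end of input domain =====

-- B replaces A's per-pair re-slicing of (x+y) by a once-per-needed-length cache of
-- deduplicated truncated-b tables, combining with x + y[:k-len(x)]; objective: alternative.

-- ===== PORT A =====
def concat_k_py (a : List (List String)) (b : List (List String)) (k : Int) : List (List String) :=
  a.foldl (fun out x =>
    if k ≤ (x.length : Int) then
      PySem.Set.add out (PySem.List.slice x none (some k))
    else
      b.foldl (fun o y => PySem.Set.add o (PySem.List.slice (x ++ y) none (some k))) out)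
    PySem.Set.empty

-- ===== PORT B =====
def concat_k_py_alt (a : List (List String)) (b : List (List String)) (k : Int) : List (List String) :=
  (a.foldl (fun (st : PySem.Set (List String) × PySem.Dict Int (List (List String))) x =>
      if k - (x.length : Int) ≤ 0 then
        (PySem.Set.add st.1 (PySem.List.slice x none (some k)), st.2)
      else
        match st.2.get? (k - (x.length : Int)) with
        | some tb => (tb.foldl (fun o yt => PySem.Set.add o (x ++ yt)) st.1, st.2)
        | none =>
          let tb := PySem.List.dedup (b.map (fun y => PySem.List.slice y none (some (k - (x.length : Int)))))
          (tb.foldl (fun o yt => PySem.Set.add o (x ++ yt)) st.1, st.2.insert (k - (x.length : Int)) tb))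
    (PySem.Set.empty, PySem.Dict.empty)).1

-- ===== PRECONDITION & SPEC =====
def Spec_concat_k_py (a : List (List String)) (b : List (List String)) (k : Int) (out : List (List String)) : Prop := out = concat_k_py_alt a b k
instance (a : List (List String)) (b : List (List String)) (k : Int) (out : List (List String)) : Decidable (Spec_concat_k_py a b k out) := by unfold Spec_concat_k_py; infer_instance

-- ===== CLAIM (what is proved, stated in full; the proofs are below) =====
def Claim_equal_concat_k_py : Prop := ∀ (a : List (List String)) (b : List (List String)) (k : Int), Dom_concat_k_py a b k → Spec_concat_k_py a b k (concat_k_py a b k)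

-- ===== LEMMAS AND PROOFS =====

-- dedup-before-map equals dedup-after-map (as ordered dedup lists)
theorem ofList_map_ofList {α β : Type} [BEq α] [LawfulBEq α] [BEq β] [LawfulBEq β]
    (h : α → β) (l : List α) :
    PySem.Set.ofList ((PySem.Set.ofList l).map h) = PySem.Set.ofList (l.map h) := by
  induction l using List.reverseRecOn with
  | nil => rfl
  | append_singleton t v ih =>
    by_cases hv : v ∈ PySem.Set.ofList t
    · have hvt : v ∈ t := (PySem.Set.mem_ofList _ _).1 hv
      have hmem : h v ∈ PySem.Set.ofList (t.map h) :=
        (PySem.Set.mem_ofList _ _).2 (List.mem_map_of_mem hvt)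
      rw [PySem.Set.ofList_append_singleton, PySem.Set.add_of_mem hv, ih,
        List.map_append, List.map_singleton, PySem.Set.ofList_append_singleton,
        PySem.Set.add_of_mem hmem]
    · rw [PySem.Set.ofList_append_singleton, PySem.Set.add_of_not_mem hv,
        List.map_append, List.map_singleton, PySem.Set.ofList_append_singleton, ih,
        List.map_append, List.map_singleton, PySem.Set.ofList_append_singleton]

-- folding `add` over a list and over its ordered dedup build the same set
theorem foldl_add_dedup {α β : Type} [BEq α] [LawfulBEq α] [BEq β] [LawfulBEq β]
    (g : α → β) (l : List α) (s : PySem.Set β) :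
    (PySem.List.dedup l).foldl (fun o x => PySem.Set.add o (g x)) s
      = l.foldl (fun o x => PySem.Set.add o (g x)) s := by
  rw [← PySem.Set.update_map_eq_foldl_add, ← PySem.Set.update_map_eq_foldl_add,
    PySem.Set.update_eq_append_filter, PySem.Set.update_eq_append_filter,
    PySem.List.dedup_eq_ofList, ofList_map_ofList]

-- A's inner loop over b equals B's loop over the deduplicated truncated-b table
theorem inner_eq (b : List (List String)) (k : Int) (x : List String)
    (hx : (x.length : Int) < k) (out : PySem.Set (List String)) :
    b.foldl (fun o y => PySem.Set.add o (PySem.List.slice (x ++ y) none (some k))) out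
      = (PySem.List.dedup (b.map (fun y => PySem.List.slice y none (some (k - (x.length : Int)))))).foldl
          (fun o yt => PySem.Set.add o (x ++ yt)) out := by
  have hk : 0 ≤ k := le_trans (by positivity) (le_of_lt hx)
  have hm : 0 ≤ k - (x.length : Int) := by omega
  have hlen : x.length ≤ k.toNat := by omega
  rw [foldl_add_dedup, List.foldl_map]
  apply PySem.List.foldl_congr_mem
  intro o y _
  rw [PySem.List.slice_to _ hk, PySem.List.slice_to _ hm,
    List.take_append, List.take_of_length_le hlen,
    (by omega : (k - (x.length : Int)).toNat = k.toNat - x.length)]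

-- main invariant: if every cached table is the deduplicated truncated b for its key,
-- B's fold over a computes exactly A's fold over a
theorem main_fold (b : List (List String)) (k : Int) :
    ∀ (a : List (List String)) (out : PySem.Set (List String))
      (cache : PySem.Dict Int (List (List String))),
    (∀ m tb, cache.get? m = some tb →
        tb = PySem.List.dedup (b.map (fun y => PySem.List.slice y none (some m)))) →
    (a.foldl (fun (st : PySem.Set (List String) × PySem.Dict Int (List (List String))) x =>
      if k - (x.length : Int) ≤ 0 then
        (PySem.Set.add st.1 (PySem.List.slice x none (some k)), st.2)
      else
        match st.2.get? (k - (x.length : Int)) with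
        | some tb => (tb.foldl (fun o yt => PySem.Set.add o (x ++ yt)) st.1, st.2)
        | none =>
          let tb := PySem.List.dedup (b.map (fun y => PySem.List.slice y none (some (k - (x.length : Int)))))
          (tb.foldl (fun o yt => PySem.Set.add o (x ++ yt)) st.1, st.2.insert (k - (x.length : Int)) tb))
      (out, cache)).1
    = a.foldl (fun out x =>
        if k ≤ (x.length : Int) then
          PySem.Set.add out (PySem.List.slice x none (some k))
        else
          b.foldl (fun o y => PySem.Set.add o (PySem.List.slice (x ++ y) none (some k))) out) out := by
  intro a
  induction a with
  | nil => intro out cache _; rfl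
  | cons x t ih =>
    intro out cache hinv
    simp only [List.foldl_cons]
    by_cases hx : k ≤ (x.length : Int)
    · rw [if_pos (by omega : k - (x.length : Int) ≤ 0), if_pos hx]
      exact ih _ _ hinv
    · have hlt : (x.length : Int) < k := lt_of_not_ge hx
      rw [if_neg (by omega : ¬ k - (x.length : Int) ≤ 0), if_neg hx]
      rcases hc : cache.get? (k - (x.length : Int)) with _ | tb
      · rw [ih _ _ (by
          intro m tb' hm
          rw [PySem.Dict.get?_insert] at hm
          split at hm
          · cases hm; subst ‹m = _›; rfl
          · exact hinv _ _ hm)]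
        rw [inner_eq b k x hlt]
      · rw [ih _ _ hinv, hinv _ _ hc, inner_eq b k x hlt]

-- ===== VERDICT (by name: the statement is the Claim_ definition above) =====
theorem concat_k_py_spec : Claim_equal_concat_k_py := by
  intro a b k _
  unfold Spec_concat_k_py concat_k_py concat_k_py_alt
  rw [main_fold]
  intro m tb hm
  rw [PySem.Dict.get?_empty] at hm
  cases hm
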